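-- pv_equiv track=rewrite | github.com/Yawn-Sean/Daily_CF_Problems | daily_problems/2024/12/1211/personal_submission/cf671b_liryc.py | solve
-- ===== SOURCE A (Python) =====
-- def solve(n: int, k: int, c: list[int]) -> int:
--     c.sort()
--     a = 0 # a[i]: coins needed for c[i:] all become c[i]
--     hi = c[-1] # coins the richest has
--     for i in range(n - 2, -1, -1):
--         d = (c[i + 1] - c[i]) * (n - i - 1)
--         if a + d <= k:
--             a += d
--             hi = c[i]
--             if a == k: break
--         else:
--             hi = c[i + 1] - (k - a) // (n - i - 1)
--             break
--     a = 0
--     lo = c[0] # coins the poorest has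
--     for i in range(1, n):
--         d = (c[i] - c[i - 1]) * i
--         if a + d <= k:
--             a += d
--             lo = c[i]
--             if a == k: break
--         else:
--             lo = c[i - 1] + (k - a) // i
--             break
--
--     return hi - lo if hi > lo else 1 if sum(c) % n else 0
-- ===== SOURCE B (Python) =====
-- def solve(n: int, k: int, c: list[int]) -> int:
--     # prefix-sum + threshold-count reformulation; does not mutate c (A sorts it in place)
--     s = sorted(c)
--     pre = [0]
--     for x in s:
--         pre.append(pre[-1] + x)
--     if n <= 1:
--         # fewer than two declared holders: no transfer moves anything
--         hi, lo = s[-1], s[0]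
--     else:
--         # costH(t): coins to flatten the top t of the first n down to level s[n-t]
--         # costL(u): coins to raise the bottom u up to level s[u-1]
--         tH = 1 + sum(1 for t in range(2, n + 1) if (pre[n] - pre[n - t]) - t * s[n - t] <= k)
--         uL = 1 + sum(1 for u in range(2, n + 1) if u * s[u - 1] - pre[u] <= k)
--         if tH == n:
--             hi = s[0]
--         else:
--             hi = s[n - tH] - (k - ((pre[n] - pre[n - tH]) - tH * s[n - tH])) // tH
--         if uL == n:
--             lo = s[n - 1]
--         else:
--             lo = s[uL - 1] + (k - (uL * s[uL - 1] - pre[uL])) // uL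
--     return hi - lo if hi > lo else 1 if pre[len(s)] % n else 0
-- ===== Notes on version B (the rewrite author's own statement) =====
-- stated objective: alternative
-- what changed: Replaces A's two stateful greedy loops (running cost accumulator, early breaks, incremental hi/lo updates) by a prefix-sum array plus a threshold count: the number t of top (resp. bottom) elements flattenable within budget k is obtained by counting the levels whose closed-form prefix-sum cost fits in k, and hi/lo are then computed by one closed-form floor-division formula each (for n <= 1 no transfer moves anything and the extremes stay); B also does not mutate c (A sorts it in place), so the equivalence is about the return value.
import Mathlib
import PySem

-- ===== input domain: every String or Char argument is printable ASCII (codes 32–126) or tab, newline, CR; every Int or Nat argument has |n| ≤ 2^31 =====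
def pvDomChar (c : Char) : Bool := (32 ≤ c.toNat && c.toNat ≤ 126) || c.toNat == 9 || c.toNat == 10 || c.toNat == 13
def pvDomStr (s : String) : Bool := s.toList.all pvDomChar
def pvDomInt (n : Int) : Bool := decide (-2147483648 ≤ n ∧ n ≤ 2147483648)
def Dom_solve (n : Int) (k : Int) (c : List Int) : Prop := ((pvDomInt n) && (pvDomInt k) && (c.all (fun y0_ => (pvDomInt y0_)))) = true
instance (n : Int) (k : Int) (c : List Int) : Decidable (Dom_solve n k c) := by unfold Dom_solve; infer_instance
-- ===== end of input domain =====

-- B replaces A's two stateful greedy loops by prefix sums plus a threshold count and closed-form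
-- hi/lo formulas (equivalence is about the return value: A sorts c in place, B does not mutate it).

-- ===== PORT A =====
-- the 'for i in range(n-2,-1,-1)' loop with its breaks, as structural recursion on the range list
def solveHiLoop (s : List Int) (n k : Int) : List Int → Int × Int → Int × Int
  | [], st => st
  | i :: rest, st =>
    let d := (PySem.List.pyGetD s (i + 1) 0 - PySem.List.pyGetD s i 0) * (n - i - 1)
    if st.1 + d ≤ k then
      if st.1 + d = k then (st.1 + d, PySem.List.pyGetD s i 0)
      else solveHiLoop s n k rest (st.1 + d, PySem.List.pyGetD s i 0)
    else (st.1, PySem.List.pyGetD s (i + 1) 0 - PySem.Int.floordiv (k - st.1) (n - i - 1))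

-- the 'for i in range(1,n)' loop with its breaks
def solveLoLoop (s : List Int) (k : Int) : List Int → Int × Int → Int × Int
  | [], st => st
  | i :: rest, st =>
    let d := (PySem.List.pyGetD s i 0 - PySem.List.pyGetD s (i - 1) 0) * i
    if st.1 + d ≤ k then
      if st.1 + d = k then (st.1 + d, PySem.List.pyGetD s i 0)
      else solveLoLoop s k rest (st.1 + d, PySem.List.pyGetD s i 0)
    else (st.1, PySem.List.pyGetD s (i - 1) 0 + PySem.Int.floordiv (k - st.1) i)

def solve (n : Int) (k : Int) (c : List Int) : Int :=
  let s := PySem.List.sorted c (fun x => x) false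
  let hi := (solveHiLoop s n k (PySem.List.pyRange (n - 2) (-1) (-1)) (0, PySem.List.pyGetD s (-1) 0)).2
  let lo := (solveLoLoop s k (PySem.List.pyRange 1 n 1) (0, PySem.List.pyGetD s 0 0)).2
  if lo < hi then hi - lo else if PySem.Int.mod s.sum n ≠ 0 then 1 else 0

-- ===== PORT B =====
def solve_alt (n : Int) (k : Int) (c : List Int) : Int :=
  let s := PySem.List.sorted c (fun x => x) false
  let pre := s.foldl (fun acc x => acc ++ [PySem.List.pyGetD acc (-1) 0 + x]) [(0 : Int)]
  let p : Int → Int := fun i => PySem.List.pyGetD pre i 0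
  let g : Int → Int := fun i => PySem.List.pyGetD s i 0
  let hi :=
    if n ≤ 1 then PySem.List.pyGetD s (-1) 0
    else
      let tH := 1 + (PySem.List.pyRange 2 (n + 1) 1).foldl
        (fun acc t => if (p n - p (n - t)) - t * g (n - t) ≤ k then acc + 1 else acc) 0
      if tH = n then g 0
      else g (n - tH) - PySem.Int.floordiv (k - ((p n - p (n - tH)) - tH * g (n - tH))) tH
  let lo :=
    if n ≤ 1 then PySem.List.pyGetD s 0 0
    else
      let uL := 1 + (PySem.List.pyRange 2 (n + 1) 1).foldl
        (fun acc u => if u * g (u - 1) - p u ≤ k then acc + 1 else acc) 0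
      if uL = n then g (n - 1)
      else g (uL - 1) + PySem.Int.floordiv (k - (uL * g (uL - 1) - p uL)) uL
  if lo < hi then hi - lo else if PySem.Int.mod (p (s.length : Int)) n ≠ 0 then 1 else 0

-- ===== PRECONDITION & SPEC =====
-- Pre_ excludes exactly the inputs on which A raises: empty c and n > len(c) with 2 <= n
-- (IndexError), and n = 0 with all elements equal (ZeroDivisionError on sum(c) % n).
def Pre_solve (n : Int) (k : Int) (c : List Int) : Prop :=
  c ≠ [] ∧ n ≤ (c.length : Int) ∧ (n = 0 → ∃ x ∈ c, x ≠ c.getD 0 0)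
instance (n : Int) (k : Int) (c : List Int) : Decidable (Pre_solve n k c) := by
  unfold Pre_solve; infer_instance
def pvWitness_solve : Int × Int × List Int := (3, 4, [5, 1, 2])
def Spec_solve (n : Int) (k : Int) (c : List Int) (out : Int) : Prop := out = solve_alt n k c
instance (n : Int) (k : Int) (c : List Int) (out : Int) : Decidable (Spec_solve n k c out) := by
  unfold Spec_solve; infer_instance

-- ===== CLAIM (what is proved, stated in full; the proofs are below) =====
def Claim_equal_solve : Prop :=
  ∀ (n : Int) (k : Int) (c : List Int), Dom_solve n k c → Pre_solve n k c →
    Spec_solve n k c (solve n k c)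

-- ===== LEMMAS AND PROOFS =====

-- abstract views of the sorted list: element at a Nat index, prefix sum, the two cost curves
def gIdx (s : List Int) (u : Nat) : Int := s.getD u 0
def hsum (s : List Int) (u : Nat) : Int := (s.take u).sum
def costHf (s : List Int) (N : Nat) (t : Nat) : Int :=
  (hsum s N - hsum s (N - t)) - (t : Int) * gIdx s (N - t)
def costLf (s : List Int) (u : Nat) : Int := (u : Int) * gIdx s (u - 1) - hsum s u
def vHf (s : List Int) (N : Nat) (t : Nat) : Int := gIdx s (N - t)
def vLf (s : List Int) (u : Nat) : Int := gIdx s (u - 1)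

-- the common shape of A's two loops, abstracted over the cost curve and the level function
def lin (k : Int) (cost v : Nat → Int) (sgn : Int) : Nat → Nat → Int
  | 0, t => v t
  | f + 1, t =>
    if cost (t + 1) ≤ k then
      (if cost (t + 1) = k then v (t + 1) else lin k cost v sgn f (t + 1))
    else v t + sgn * PySem.Int.floordiv (k - cost t) (t : Int)

-- running prefix sums, for the bridge to B's pre list
def presumL (v : Int) : List Int → List Int
  | [] => []
  | x :: xs => (v + x) :: presumL (v + x) xs

lemma hsum_succ (s : List Int) (u : Nat) (h : u < s.length) :
    hsum s (u + 1) = hsum s u + gIdx s u := by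
  unfold hsum gIdx
  rw [List.sum_take_succ _ _ h, List.getD_eq_getElem _ _ h]

lemma sorted_adj (s : List Int) (hp : s.Pairwise (· ≤ ·)) (u : Nat) (h : u + 1 < s.length) :
    gIdx s u ≤ gIdx s (u + 1) := by
  unfold gIdx
  rw [List.getD_eq_getElem _ _ (by omega), List.getD_eq_getElem _ _ h]
  exact List.pairwise_iff_getElem.mp hp u (u + 1) (by omega) h (by omega)

lemma costH_one (s : List Int) (N : Nat) (h1 : 1 ≤ N) (h2 : N ≤ s.length) :
    costHf s N 1 = 0 := by
  have e : N = (N - 1) + 1 := by omega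
  have hs : hsum s N = hsum s (N - 1) + gIdx s (N - 1) := by
    rw [e]; exact hsum_succ s (N - 1) (by omega)
  unfold costHf
  rw [hs]; push_cast; ring

lemma costL_one (s : List Int) (h : 1 ≤ s.length) : costLf s 1 = 0 := by
  have hs : hsum s 1 = hsum s 0 + gIdx s 0 := hsum_succ s 0 (by omega)
  unfold costLf
  rw [hs]; unfold hsum; simp

lemma incH (s : List Int) (N t : Nat) (h1 : 1 ≤ t) (h2 : t < N) (h3 : N ≤ s.length) :
    costHf s N (t + 1) = costHf s N t + (t : Int) * (gIdx s (N - t) - gIdx s (N - t - 1)) := by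
  have e1 : N - (t + 1) = N - t - 1 := by omega
  have e2 : N - t = (N - t - 1) + 1 := by omega
  have hs := hsum_succ s (N - t - 1) (by omega)
  unfold costHf
  rw [e1, e2, hs]; push_cast; ring

lemma incL (s : List Int) (u : Nat) (h1 : 1 ≤ u) (h2 : u < s.length) :
    costLf s (u + 1) = costLf s u + (u : Int) * (gIdx s u - gIdx s (u - 1)) := by
  have e : u + 1 - 1 = u := by omega
  have hs := hsum_succ s u h2
  unfold costLf
  rw [e, hs]; push_cast; ring

lemma monoH (s : List Int) (N : Nat) (hp : s.Pairwise (· ≤ ·)) (h3 : N ≤ s.length)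
    (t : Nat) (h1 : 1 ≤ t) (h2 : t < N) : costHf s N t ≤ costHf s N (t + 1) := by
  have hadj := sorted_adj s hp (N - t - 1) (by omega)
  have e : N - t - 1 + 1 = N - t := by omega
  rw [e] at hadj
  rw [incH s N t h1 h2 h3]
  have h0 : (0 : Int) ≤ (t : Int) * (gIdx s (N - t) - gIdx s (N - t - 1)) :=
    mul_nonneg (by positivity) (by linarith)
  linarith

lemma eqH (s : List Int) (N : Nat) (hp : s.Pairwise (· ≤ ·)) (h3 : N ≤ s.length)
    (t : Nat) (h1 : 1 ≤ t) (h2 : t < N) (he : costHf s N (t + 1) = costHf s N t) :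
    vHf s N (t + 1) = vHf s N t := by
  have hi := incH s N t h1 h2 h3
  have ht : (t : Int) * (gIdx s (N - t) - gIdx s (N - t - 1)) = 0 := by
    rw [he] at hi; linarith
  have htne : (t : Int) ≠ 0 := by exact_mod_cast Nat.one_le_iff_ne_zero.mp h1
  have hd : gIdx s (N - t) - gIdx s (N - t - 1) = 0 := by
    rcases mul_eq_zero.mp ht with h | h
    · exact absurd h htne
    · exact h
  unfold vHf
  have e : N - (t + 1) = N - t - 1 := by omega
  rw [e]; linarith

lemma monoL (s : List Int) (N : Nat) (hp : s.Pairwise (· ≤ ·)) (h3 : N ≤ s.length)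
    (u : Nat) (h1 : 1 ≤ u) (h2 : u < N) : costLf s u ≤ costLf s (u + 1) := by
  have hadj := sorted_adj s hp (u - 1) (by omega)
  have e : u - 1 + 1 = u := by omega
  rw [e] at hadj
  rw [incL s u h1 (by omega)]
  have h0 : (0 : Int) ≤ (u : Int) * (gIdx s u - gIdx s (u - 1)) :=
    mul_nonneg (by positivity) (by linarith)
  linarith

lemma eqL (s : List Int) (N : Nat) (hp : s.Pairwise (· ≤ ·)) (h3 : N ≤ s.length)
    (u : Nat) (h1 : 1 ≤ u) (h2 : u < N) (he : costLf s (u + 1) = costLf s u) :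
    vLf s (u + 1) = vLf s u := by
  have hi := incL s u h1 (by omega)
  have ht : (u : Int) * (gIdx s u - gIdx s (u - 1)) = 0 := by
    rw [he] at hi; linarith
  have htne : (u : Int) ≠ 0 := by exact_mod_cast Nat.one_le_iff_ne_zero.mp h1
  have hd : gIdx s u - gIdx s (u - 1) = 0 := by
    rcases mul_eq_zero.mp ht with h | h
    · exact absurd h htne
    · exact h
  unfold vLf
  have e : u + 1 - 1 = u := by omega
  rw [e]; linarith

-- chained monotonicity and constancy of the level under constant cost
lemma monoChain (N : Nat) (cost : Nat → Int)
    (hm : ∀ t, 1 ≤ t → t < N → cost t ≤ cost (t + 1))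
    (a b : Nat) (h1 : 1 ≤ a) (h2 : a ≤ b) (h3 : b ≤ N) : cost a ≤ cost b := by
  revert h3
  induction b, h2 using Nat.le_induction with
  | base => intro _; exact le_rfl
  | succ n hn ih =>
    intro h3
    exact le_trans (ih (by omega)) (hm n (by omega) (by omega))

lemma vConst (N : Nat) (cost v : Nat → Int)
    (hm : ∀ t, 1 ≤ t → t < N → cost t ≤ cost (t + 1))
    (he : ∀ t, 1 ≤ t → t < N → cost (t + 1) = cost t → v (t + 1) = v t)
    (a b : Nat) (h1 : 1 ≤ a) (h2 : a ≤ b) (h3 : b ≤ N) (hc : cost b ≤ cost a) : v b = v a := by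
  revert h3 hc
  induction b, h2 using Nat.le_induction with
  | base => intro _ _; rfl
  | succ n hn ih =>
    intro h3 hc
    have hca : cost a ≤ cost n := monoChain N cost hm a n h1 hn (by omega)
    have hcn : cost n ≤ cost (n + 1) := hm n (by omega) (by omega)
    have he1 : cost (n + 1) = cost n := by linarith
    rw [he n (by omega) (by omega) he1]
    exact ih (by omega) (by linarith)

lemma countP_range_lt (m c : Nat) :
    (List.range m).countP (fun j => decide (j < c)) = min c m := by
  induction m with
  | zero => simp
  | succ m ih =>
    rw [List.range_succ, List.countP_append, ih]
    by_cases h : m < c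
    · simp [List.countP_cons, h]; omega
    · simp [List.countP_cons, h]; omega

lemma count_eq (N t0 : Nat) (P : Nat → Prop) [DecidablePred P]
    (h1 : 1 ≤ t0) (h2 : t0 ≤ N)
    (hiff : ∀ t, 2 ≤ t → t ≤ N → (P t ↔ t ≤ t0)) :
    (List.range (N - 1)).countP (fun j => decide (P (j + 2))) = t0 - 1 := by
  have hc : (List.range (N - 1)).countP (fun j => decide (P (j + 2))) =
      (List.range (N - 1)).countP (fun j => decide (j < t0 - 1)) := by
    apply List.countP_congr
    intro j hj
    have hj' : j < N - 1 := List.mem_range.mp hj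
    simp only [decide_eq_true_iff]
    rw [hiff (j + 2) (by omega) (by omega)]
    omega
  rw [hc, countP_range_lt]
  omega

lemma fdiv_zero (b : Int) (h : 0 < b) : PySem.Int.floordiv 0 b = 0 := by
  rw [PySem.Int.floordiv_eq_ediv_of_pos h]
  simp

-- the generic equivalence: A's stop-early linear scan equals B's count-then-formula
def cntT (N : Nat) (k : Int) (cost : Nat → Int) : Nat :=
  1 + (List.range (N - 1)).countP (fun j => decide (cost (j + 2) ≤ k))

def cntRes (N : Nat) (k : Int) (cost v : Nat → Int) (sgn : Int) : Int :=
  if cntT N k cost = N then v N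
  else v (cntT N k cost) + sgn * PySem.Int.floordiv (k - cost (cntT N k cost)) ((cntT N k cost : Nat) : Int)

lemma cntT_le (N : Nat) (k : Int) (cost : Nat → Int) (hN : 1 ≤ N) : cntT N k cost ≤ N := by
  unfold cntT
  have := List.countP_le_length (p := fun j => decide (cost (j + 2) ≤ k)) (l := List.range (N - 1))
  simp only [List.length_range] at this
  omega

lemma gen (N : Nat) (k : Int) (cost v : Nat → Int) (sgn : Int) (hN : 1 ≤ N)
    (hm : ∀ t, 1 ≤ t → t < N → cost t ≤ cost (t + 1))
    (he : ∀ t, 1 ≤ t → t < N → cost (t + 1) = cost t → v (t + 1) = v t) :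
    lin k cost v sgn (N - 1) 1 = cntRes N k cost v sgn := by
  suffices aux : ∀ f t0, t0 = N - f → f ≤ N - 1 →
      (∀ t, 2 ≤ t → t ≤ t0 → cost t ≤ k) →
      lin k cost v sgn f t0 = cntRes N k cost v sgn by
    exact aux (N - 1) 1 (by omega) (by omega) (fun t h2 h1 => absurd (le_trans h2 h1) (by omega))
  intro f
  induction f with
  | zero =>
    intro t0 ht0 _ hall
    have ht0N : t0 = N := by omega
    have hiff : ∀ t, 2 ≤ t → t ≤ N → (cost t ≤ k ↔ t ≤ t0) := by
      intro t h2 hN'; exact ⟨fun _ => by omega, fun _ => hall t h2 (by omega)⟩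
    have hcnt : cntT N k cost = N := by
      unfold cntT; rw [count_eq N t0 _ (by omega) (by omega) hiff]; omega
    rw [ht0N]
    simp [lin, cntRes, hcnt]
  | succ f ih =>
    intro t0 ht0 hf hall
    have h1t0 : 1 ≤ t0 := by omega
    have ht0N : t0 < N := by omega
    simp only [lin]
    by_cases hc : cost (t0 + 1) ≤ k
    · by_cases hck : cost (t0 + 1) = k
      · rw [if_pos hc, if_pos hck]
        set Pk : Nat → Prop := fun t => cost t ≤ k with hPk
        have hfs : cost (Nat.findGreatest Pk N) ≤ k :=
          Nat.findGreatest_spec (P := Pk) (m := t0 + 1) (n := N) (by omega) (show Pk (t0 + 1) from hc)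
        have hT1 : t0 + 1 ≤ Nat.findGreatest Pk N := by
          by_contra hlt
          exact (Nat.findGreatest_is_greatest (P := Pk) (k := t0 + 1) (n := N) (by omega) (by omega))
            (show Pk (t0 + 1) from hc)
        have hTN : Nat.findGreatest Pk N ≤ N := Nat.findGreatest_le N
        have hiff : ∀ t, 2 ≤ t → t ≤ N → (cost t ≤ k ↔ t ≤ Nat.findGreatest Pk N) := by
          intro t h2 htN
          constructor
          · intro hPt
            by_contra hgt
            exact (Nat.findGreatest_is_greatest (P := Pk) (k := t) (n := N) (by omega) htN)
              (show Pk t from hPt)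
          · intro htT
            exact le_trans (monoChain N cost hm t (Nat.findGreatest Pk N) (by omega) htT hTN) hfs
        have hcnt : cntT N k cost = Nat.findGreatest Pk N := by
          unfold cntT; rw [count_eq N (Nat.findGreatest Pk N) _ (by omega) hTN hiff]; omega
        have hcTk : cost (Nat.findGreatest Pk N) = k := by
          have := monoChain N cost hm (t0 + 1) (Nat.findGreatest Pk N) (by omega) hT1 hTN
          omega
        have hv : v (Nat.findGreatest Pk N) = v (t0 + 1) :=
          vConst N cost v hm he (t0 + 1) (Nat.findGreatest Pk N) (by omega) hT1 hTN (by omega)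
        unfold cntRes
        rw [hcnt]
        split_ifs with hTn
        · rw [← hv, hTn]
        · have hz : k - cost (Nat.findGreatest Pk N) = 0 := by omega
          rw [hz, fdiv_zero _ (by exact_mod_cast Nat.lt_of_lt_of_le Nat.zero_lt_one (by omega))]
          rw [← hv]; ring
      · rw [if_pos hc, if_neg hck]
        have e1 : t0 + 1 = N - f := by omega
        have e2 : f ≤ N - 1 := by omega
        refine ih (t0 + 1) e1 e2 ?_
        intro t h2 ht
        rcases Nat.lt_or_ge t (t0 + 1) with h | h
        · exact hall t h2 (by omega)
        · have : t = t0 + 1 := by omega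
          rw [this]; exact hc
    · rw [if_neg hc]
      have hiff : ∀ t, 2 ≤ t → t ≤ N → (cost t ≤ k ↔ t ≤ t0) := by
        intro t h2 htN
        constructor
        · intro hPt
          by_contra hgt
          have := monoChain N cost hm (t0 + 1) t (by omega) (by omega) htN
          omega
        · intro ht; exact hall t h2 ht
      have hcnt : cntT N k cost = t0 := by
        unfold cntT; rw [count_eq N t0 _ (by omega) (by omega) hiff]; omega
      unfold cntRes
      rw [hcnt, if_neg (by omega)]

-- A's hi loop equals lin over costHf
lemma loopA_lin (s : List Int) (n k : Int) (N : Nat) (hn : n = (N : Int)) (hN : 1 ≤ N)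
    (hlen : N ≤ s.length) :
    ∀ (m : Nat), m ≤ N - 1 → ∀ (a h : Int), a = costHf s N (N - m) →
      (m = 0 → h = vHf s N N) →
      (solveHiLoop s n k (PySem.List.pyRange ((m : Int) - 1) (-1) (-1)) (a, h)).2 =
        lin k (costHf s N) (vHf s N) (-1) m (N - m) := by
  intro m
  induction m with
  | zero =>
    intro _ a h ha hh
    rw [PySem.List.pyRange_neg_one_eq_nil (by norm_num)]
    simp only [solveHiLoop, lin]
    exact hh rfl
  | succ m ih =>
    intro hm a h ha hh
    have hcast : ((m + 1 : Nat) : Int) - 1 = (m : Int) := by push_cast; ring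
    rw [hcast, PySem.List.pyRange_neg_one_cons (by omega)]
    simp only [solveHiLoop]
    have hg1 : PySem.List.pyGetD s ((m : Int) + 1) 0 = gIdx s (m + 1) := by
      rw [show ((m : Int) + 1) = ((m + 1 : Nat) : Int) by push_cast; ring,
        PySem.List.pyGetD_natCast]; rfl
    have hg0 : PySem.List.pyGetD s (m : Int) 0 = gIdx s m := by
      rw [PySem.List.pyGetD_natCast]; rfl
    have hnm : n - (m : Int) - 1 = ((N - (m + 1) : Nat) : Int) := by omega
    have e1 : N - (N - (m + 1)) = m + 1 := by omega
    have e3 : N - (m + 1) + 1 = N - m := by omega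
    have hd : a + (gIdx s (m + 1) - gIdx s m) * ((N - (m + 1) : Nat) : Int) =
        costHf s N (N - m) := by
      rw [ha, ← e3, incH s N (N - (m + 1)) (by omega) (by omega) hlen, e1]
      simp only [Nat.add_sub_cancel]
      ring
    rw [hg1, hg0, hnm]
    simp only [lin, hd, e3]
    split_ifs with h1 h2
    · -- break: both return the new level
      show gIdx s m = vHf s N (N - m)
      unfold vHf
      congr 1
      omega
    · -- accept and continue
      refine ih (by omega) _ _ rfl ?_
      intro h0
      subst h0
      unfold vHf
      congr 1
      omega
    · -- reject
      show gIdx s (m + 1) - PySem.Int.floordiv (k - a) ((N - (m + 1) : Nat) : Int) =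
        vHf s N (N - (m + 1)) + -1 * PySem.Int.floordiv (k - costHf s N (N - (m + 1)))
          ((N - (m + 1) : Nat) : Int)
      rw [ha]
      unfold vHf
      rw [e1]
      ring

-- A's lo loop equals lin over costLf
lemma loopB_lin (s : List Int) (n k : Int) (N : Nat) (hn : n = (N : Int)) (hN : 1 ≤ N)
    (hlen : N ≤ s.length) :
    ∀ (m : Nat), m ≤ N - 1 → ∀ (a h : Int), a = costLf s (N - m) →
      (m = 0 → h = vLf s N) →
      (solveLoLoop s k (PySem.List.pyRange ((N : Int) - (m : Int)) (N : Int) 1) (a, h)).2 =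
        lin k (costLf s) (vLf s) 1 m (N - m) := by
  intro m
  induction m with
  | zero =>
    intro _ a h ha hh
    rw [PySem.List.pyRange_one_eq_nil (by omega)]
    simp only [solveLoLoop, lin]
    exact hh rfl
  | succ m ih =>
    intro hm a h ha hh
    have hu : (N : Int) - ((m + 1 : Nat) : Int) = ((N - (m + 1) : Nat) : Int) := by omega
    rw [hu, PySem.List.pyRange_one_cons (by omega)]
    simp only [solveLoLoop]
    have hg0 : PySem.List.pyGetD s ((N - (m + 1) : Nat) : Int) 0 = gIdx s (N - (m + 1)) := by
      rw [PySem.List.pyGetD_natCast]; rfl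
    have hg1 : PySem.List.pyGetD s (((N - (m + 1) : Nat) : Int) - 1) 0 =
        gIdx s (N - (m + 1) - 1) := by
      rw [show (((N - (m + 1) : Nat) : Int) - 1) = ((N - (m + 1) - 1 : Nat) : Int) by omega,
        PySem.List.pyGetD_natCast]; rfl
    have e3 : N - (m + 1) + 1 = N - m := by omega
    have e4 : ((N - (m + 1) : Nat) : Int) + 1 = (N : Int) - (m : Int) := by omega
    have hd : a + (gIdx s (N - (m + 1)) - gIdx s (N - (m + 1) - 1)) *
        ((N - (m + 1) : Nat) : Int) = costLf s (N - m) := by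
      rw [ha, ← e3, incL s (N - (m + 1)) (by omega) (by omega)]
      ring
    rw [hg0, hg1]
    simp only [lin, hd, e3]
    split_ifs with h1 h2
    · show gIdx s (N - (m + 1)) = vLf s (N - m)
      unfold vLf
      congr 1
    · rw [e4]
      refine ih (by omega) _ _ rfl ?_
      intro h0
      subst h0
      unfold vLf
      congr 1
    · show gIdx s (N - (m + 1) - 1) + PySem.Int.floordiv (k - a) ((N - (m + 1) : Nat) : Int) =
        vLf s (N - (m + 1)) + 1 * PySem.Int.floordiv (k - costLf s (N - (m + 1)))
          ((N - (m + 1) : Nat) : Int)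
      rw [ha]
      unfold vLf
      ring

-- bridge to B's pre list
lemma foldl_presum (xs : List Int) : ∀ (acc : List Int) (v : Int), acc ≠ [] →
    PySem.List.pyGetD acc (-1) 0 = v →
    xs.foldl (fun acc x => acc ++ [PySem.List.pyGetD acc (-1) 0 + x]) acc = acc ++ presumL v xs := by
  induction xs with
  | nil => intro acc v _ _; simp [presumL]
  | cons x xs ih =>
    intro acc v hne hv
    simp only [List.foldl, presumL]
    rw [hv, ih (acc ++ [v + x]) (v + x) (by simp) (PySem.List.pyGetD_neg_one_append_singleton acc (v + x) 0)]
    simp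

lemma presum_getD (s : List Int) : ∀ (u : Nat) (v : Int), u < s.length →
    (presumL v s).getD u 0 = v + hsum s (u + 1) := by
  induction s with
  | nil => intro u v h; simp at h
  | cons x xs ih =>
    intro u v h
    cases u with
    | zero => simp [presumL, hsum]
    | succ u =>
      simp only [presumL, List.getD_cons_succ]
      rw [ih u (v + x) (by simpa using h)]
      simp only [hsum, List.take_succ_cons, List.sum_cons]
      ring

lemma pre_bridge (s : List Int) (i : Nat) (h : i ≤ s.length) :
    PySem.List.pyGetD
      (s.foldl (fun acc x => acc ++ [PySem.List.pyGetD acc (-1) 0 + x]) [(0 : Int)]) (i : Int) 0 =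
    hsum s i := by
  rw [foldl_presum s [0] 0 (by simp) (by rfl), PySem.List.pyGetD_natCast]
  cases i with
  | zero => simp [hsum]
  | succ i =>
    simp only [List.singleton_append, List.getD_cons_succ]
    rw [presum_getD s i 0 (by omega)]
    ring

-- common closed form both programs reduce to
def Fval (s : List Int) (N : Nat) (k : Int) : Int :=
  if cntRes N k (costLf s) (vLf s) 1 < cntRes N k (costHf s N) (vHf s N) (-1) then
    cntRes N k (costHf s N) (vHf s N) (-1) - cntRes N k (costLf s) (vLf s) 1
  else if PySem.Int.mod s.sum (N : Int) ≠ 0 then 1 else 0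

lemma A_eq_F (n k : Int) (c : List Int) (N : Nat) (hn : n = (N : Int)) (hN : 2 ≤ N)
    (hlenc : n ≤ (c.length : Int)) :
    solve n k c = Fval (PySem.List.sorted c (fun x => x) false) N k := by
  set s := PySem.List.sorted c (fun x => x) false with hs
  have hsc : s.length = c.length := (PySem.List.sorted_perm c (fun x => x) false).length_eq
  have hlen : N ≤ s.length := by omega
  have hp : s.Pairwise (· ≤ ·) := by
    simpa using PySem.List.sorted_pairwise c (fun x => x)
  have hmH : ∀ t, 1 ≤ t → t < N → costHf s N t ≤ costHf s N (t + 1) :=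
    fun t h1 h2 => monoH s N hp hlen t h1 h2
  have heH : ∀ t, 1 ≤ t → t < N → costHf s N (t + 1) = costHf s N t →
      vHf s N (t + 1) = vHf s N t := fun t h1 h2 he => eqH s N hp hlen t h1 h2 he
  have hmL : ∀ t, 1 ≤ t → t < N → costLf s t ≤ costLf s (t + 1) :=
    fun t h1 h2 => monoL s N hp hlen t h1 h2
  have heL : ∀ t, 1 ≤ t → t < N → costLf s (t + 1) = costLf s t →
      vLf s (t + 1) = vLf s t := fun t h1 h2 he => eqL s N hp hlen t h1 h2 he
  have hhi : (solveHiLoop s n k (PySem.List.pyRange (n - 2) (-1) (-1))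
      (0, PySem.List.pyGetD s (-1) 0)).2 = cntRes N k (costHf s N) (vHf s N) (-1) := by
    have hr : n - 2 = (((N - 1 : Nat) : Int)) - 1 := by omega
    have ha0 : (0 : Int) = costHf s N (N - (N - 1)) := by
      rw [show N - (N - 1) = 1 from by omega]
      exact (costH_one s N (by omega) hlen).symm
    have hh0 : N - 1 = 0 → PySem.List.pyGetD s (-1) 0 = vHf s N N := by
      intro h0; omega
    rw [hr, loopA_lin s n k N hn (by omega) hlen (N - 1) (by omega) _ _ ha0 hh0,
      show N - (N - 1) = 1 from by omega]
    exact gen N k (costHf s N) (vHf s N) (-1) (by omega) hmH heH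
  have hlo : (solveLoLoop s k (PySem.List.pyRange 1 n 1)
      (0, PySem.List.pyGetD s 0 0)).2 = cntRes N k (costLf s) (vLf s) 1 := by
    have hr : (1 : Int) = (N : Int) - ((N - 1 : Nat) : Int) := by omega
    have ha0 : (0 : Int) = costLf s (N - (N - 1)) := by
      rw [show N - (N - 1) = 1 from by omega]
      exact (costL_one s (by omega)).symm
    have hh0 : N - 1 = 0 → PySem.List.pyGetD s 0 0 = vLf s N := by
      intro h0
      rw [PySem.List.pyGetD_zero]
      unfold vLf gIdx
      congr 1
      omega
    rw [show PySem.List.pyRange 1 n 1 =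
        PySem.List.pyRange ((N : Int) - ((N - 1 : Nat) : Int)) (N : Int) 1 by rw [← hr, ← hn],
      loopB_lin s n k N hn (by omega) hlen (N - 1) (by omega) _ _ ha0 hh0,
      show N - (N - 1) = 1 from by omega]
    exact gen N k (costLf s) (vLf s) 1 (by omega) hmL heL
  simp only [solve, ← hs]
  rw [hhi, hlo, Fval, hn]

lemma B_eq_F (n k : Int) (c : List Int) (N : Nat) (hn : n = (N : Int)) (hN : 2 ≤ N)
    (hlenc : n ≤ (c.length : Int)) :
    solve_alt n k c = Fval (PySem.List.sorted c (fun x => x) false) N k := by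
  set s := PySem.List.sorted c (fun x => x) false with hs
  have hsc : s.length = c.length := (PySem.List.sorted_perm c (fun x => x) false).length_eq
  have hlen : N ≤ s.length := by omega
  set pre := s.foldl (fun acc x => acc ++ [PySem.List.pyGetD acc (-1) 0 + x]) [(0 : Int)]
    with hpre
  have hpb : ∀ (i : Nat), i ≤ s.length → PySem.List.pyGetD pre (i : Int) 0 = hsum s i :=
    fun i h => pre_bridge s i h
  have hgn : ∀ (i : Nat), PySem.List.pyGetD s (i : Int) 0 = gIdx s i :=
    fun i => by rw [PySem.List.pyGetD_natCast]; rfl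
  have hcntH : (PySem.List.pyRange 2 (n + 1) 1).foldl
      (fun acc t => if (PySem.List.pyGetD pre n 0 - PySem.List.pyGetD pre (n - t) 0) -
          t * PySem.List.pyGetD s (n - t) 0 ≤ k then acc + 1 else acc) 0 =
      ((cntT N k (costHf s N) : Nat) : Int) - 1 := by
    rw [PySem.List.foldl_ite_add_one, PySem.List.pyRange_one, List.countP_map,
      show ((n + 1 - 2).toNat) = N - 1 from by omega]
    rw [List.countP_congr (q := fun j => decide (costHf s N (j + 2) ≤ k)) ?_]
    · unfold cntT; push_cast; omega
    · intro j hj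
      have hjlt : j < N - 1 := List.mem_range.mp hj
      simp only [Function.comp, decide_eq_true_iff]
      have e1 : n - (2 + (j : Int)) = ((N - (j + 2) : Nat) : Int) := by omega
      have e2 : (2 + (j : Int)) = ((j + 2 : Nat) : Int) := by omega
      rw [e1, e2, hn, hpb N hlen, hpb (N - (j + 2)) (by omega), hgn (N - (j + 2))]
      unfold costHf
      constructor <;> intro h <;> linarith
  have hcntL : (PySem.List.pyRange 2 (n + 1) 1).foldl
      (fun acc u => if u * PySem.List.pyGetD s (u - 1) 0 - PySem.List.pyGetD pre u 0 ≤ k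
        then acc + 1 else acc) 0 =
      ((cntT N k (costLf s) : Nat) : Int) - 1 := by
    rw [PySem.List.foldl_ite_add_one, PySem.List.pyRange_one, List.countP_map,
      show ((n + 1 - 2).toNat) = N - 1 from by omega]
    rw [List.countP_congr (q := fun j => decide (costLf s (j + 2) ≤ k)) ?_]
    · unfold cntT; push_cast; omega
    · intro j hj
      have hjlt : j < N - 1 := List.mem_range.mp hj
      simp only [Function.comp, decide_eq_true_iff]
      have e1 : (2 + (j : Int)) - 1 = ((j + 1 : Nat) : Int) := by omega
      have e2 : (2 + (j : Int)) = ((j + 2 : Nat) : Int) := by omega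
      rw [e1, e2, hpb (j + 2) (by omega), hgn (j + 1)]
      unfold costLf
      rw [show j + 2 - 1 = j + 1 from by omega]
  simp only [solve_alt, ← hs, ← hpre]
  rw [if_neg (by omega : ¬ n ≤ 1), if_neg (by omega : ¬ n ≤ 1)]
  rw [hcntH, hcntL,
    show (1 : Int) + (((cntT N k (costHf s N) : Nat) : Int) - 1) =
      ((cntT N k (costHf s N) : Nat) : Int) from by ring,
    show (1 : Int) + (((cntT N k (costLf s) : Nat) : Int) - 1) =
      ((cntT N k (costLf s) : Nat) : Int) from by ring]
  have hHI : (if ((cntT N k (costHf s N) : Nat) : Int) = n then PySem.List.pyGetD s 0 0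
      else PySem.List.pyGetD s (n - ((cntT N k (costHf s N) : Nat) : Int)) 0 -
        PySem.Int.floordiv (k - ((PySem.List.pyGetD pre n 0 -
            PySem.List.pyGetD pre (n - ((cntT N k (costHf s N) : Nat) : Int)) 0) -
          ((cntT N k (costHf s N) : Nat) : Int) *
            PySem.List.pyGetD s (n - ((cntT N k (costHf s N) : Nat) : Int)) 0))
          ((cntT N k (costHf s N) : Nat) : Int)) =
      cntRes N k (costHf s N) (vHf s N) (-1) := by
    have hTle : cntT N k (costHf s N) ≤ N := cntT_le N k (costHf s N) (by omega)
    unfold cntRes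
    by_cases hT : cntT N k (costHf s N) = N
    · rw [if_pos (by omega), if_pos hT, PySem.List.pyGetD_zero]
      unfold vHf gIdx
      rw [show N - N = 0 from by omega]
    · rw [if_neg (by omega), if_neg hT]
      have e1 : n - ((cntT N k (costHf s N) : Nat) : Int) =
          ((N - cntT N k (costHf s N) : Nat) : Int) := by omega
      rw [e1, hn, hpb N hlen, hpb (N - cntT N k (costHf s N)) (by omega),
        hgn (N - cntT N k (costHf s N))]
      unfold costHf vHf
      ring
  have hLO : (if ((cntT N k (costLf s) : Nat) : Int) = n then PySem.List.pyGetD s (n - 1) 0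
      else PySem.List.pyGetD s (((cntT N k (costLf s) : Nat) : Int) - 1) 0 +
        PySem.Int.floordiv (k - (((cntT N k (costLf s) : Nat) : Int) *
            PySem.List.pyGetD s (((cntT N k (costLf s) : Nat) : Int) - 1) 0 -
          PySem.List.pyGetD pre ((cntT N k (costLf s) : Nat) : Int) 0))
          ((cntT N k (costLf s) : Nat) : Int)) =
      cntRes N k (costLf s) (vLf s) 1 := by
    have hTle : cntT N k (costLf s) ≤ N := cntT_le N k (costLf s) (by omega)
    have hT1 : 1 ≤ cntT N k (costLf s) := by unfold cntT; omega
    unfold cntRes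
    by_cases hT : cntT N k (costLf s) = N
    · rw [if_pos (by omega), if_pos hT,
        show n - 1 = ((N - 1 : Nat) : Int) from by omega, hgn (N - 1)]
      rfl
    · rw [if_neg (by omega), if_neg hT]
      have e1 : ((cntT N k (costLf s) : Nat) : Int) - 1 =
          ((cntT N k (costLf s) - 1 : Nat) : Int) := by omega
      rw [e1, hgn (cntT N k (costLf s) - 1), hpb (cntT N k (costLf s)) (by omega)]
      unfold costLf vLf
      ring
  rw [hHI, hLO, hpb s.length le_rfl]
  unfold Fval hsum
  rw [List.take_length, hn]

-- the degenerate sizes n ≤ 1: A's loops never run, B's count branch is not taken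
lemma small_eq (n k : Int) (c : List Int) (hn1 : n ≤ 1) :
    solve n k c = solve_alt n k c := by
  set s := PySem.List.sorted c (fun x => x) false with hs
  set pre := s.foldl (fun acc x => acc ++ [PySem.List.pyGetD acc (-1) 0 + x]) [(0 : Int)]
    with hpre
  simp only [solve, solve_alt, ← hs, ← hpre]
  rw [PySem.List.pyRange_neg_one_eq_nil (by omega), PySem.List.pyRange_one_eq_nil (by omega),
    if_pos hn1, if_pos hn1]
  simp only [solveHiLoop, solveLoLoop]
  rw [pre_bridge s s.length le_rfl]
  unfold hsum
  rw [List.take_length]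

-- ===== VERDICT (by name: the statement is the Claim_ definition above) =====
theorem solve_spec : Claim_equal_solve := by
  intro n k c _ hpre
  obtain ⟨h1, h2, _⟩ := hpre
  unfold Spec_solve
  rcases le_or_gt n 1 with hn1 | hn2
  · exact small_eq n k c hn1
  · have hn : n = (n.toNat : Int) := by omega
    rw [A_eq_F n k c n.toNat hn (by omega) h2, B_eq_F n k c n.toNat hn (by omega) h2]
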